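-- pv_equiv track=rewrite | github.com/ScottehMax/secret-base-editor | baseedit.py | sort_decorations
-- ===== SOURCE A (Python) =====
-- def sort_decorations(decors, positions, reverse=False):
--     sorted_decors = []
--     sorted_positions = []
--
--     # mats get drawn first
--     for i in range(len(decors)):
--         if decors[i].endswith("MAT"):
--             sorted_decors.append(decors[i])
--             sorted_positions.append(positions[i])
--
--     # then desks
--     for i in range(len(decors)):
--         if decors[i].endswith("DESK") or decors[i] == "DECOR_TIRE":
--             sorted_decors.append(decors[i])
--             sorted_positions.append(positions[i])
--
--     # then bricks
--     for i in range(len(decors)):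
--         if decors[i].endswith("BRICK"):
--             sorted_decors.append(decors[i])
--             sorted_positions.append(positions[i])
--
--     # then everything else, but lower y values get drawn first!!!!
--     sorted_decs = sorted(zip(decors, positions), key=lambda x: x[1][1], reverse=reverse)
--     for decor, pos in sorted_decs:
--         if (
--             not decor.endswith("MAT")
--             and not decor.endswith("DESK")
--             and not decor.endswith("BRICK")
--             and decor != "DECOR_TIRE"
--         ):
--             sorted_decors.append(decor)
--             sorted_positions.append(pos)
--
--     if reverse:
--         sorted_decors = sorted_decors[::-1]
--         sorted_positions = sorted_positions[::-1]
--
--     return sorted_decors, sorted_positions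
-- ===== SOURCE B (Python) =====
-- def sort_decorations(decors, positions, reverse=False):
--     # One categorizing pass into four buckets, then sort only the leftover bucket.
--     mats, desks, bricks, rest = [], [], [], []
--     for d, pos in zip(decors, positions):
--         if d.endswith("MAT"):
--             mats.append((d, pos))
--         elif d.endswith("DESK") or d == "DECOR_TIRE":
--             desks.append((d, pos))
--         elif d.endswith("BRICK"):
--             bricks.append((d, pos))
--         else:
--             rest.append((d, pos))
--     rest.sort(key=lambda x: x[1][1], reverse=reverse)
--     ordered = mats + desks + bricks + rest
--     if reverse:
--         ordered.reverse()
--     return [d for d, _ in ordered], [p for _, p in ordered]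
-- ===== Notes on version B (the rewrite author's own statement) =====
-- stated objective: faster
-- what changed: A makes three full index-loop filter scans, sorts the entire zipped list and scans it a fourth time, then conditionally reverses both result lists; B makes one classifying pass over zip(decors, positions) into four buckets, sorts only the leftover bucket by y, concatenates and reverses once.
import Mathlib
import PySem

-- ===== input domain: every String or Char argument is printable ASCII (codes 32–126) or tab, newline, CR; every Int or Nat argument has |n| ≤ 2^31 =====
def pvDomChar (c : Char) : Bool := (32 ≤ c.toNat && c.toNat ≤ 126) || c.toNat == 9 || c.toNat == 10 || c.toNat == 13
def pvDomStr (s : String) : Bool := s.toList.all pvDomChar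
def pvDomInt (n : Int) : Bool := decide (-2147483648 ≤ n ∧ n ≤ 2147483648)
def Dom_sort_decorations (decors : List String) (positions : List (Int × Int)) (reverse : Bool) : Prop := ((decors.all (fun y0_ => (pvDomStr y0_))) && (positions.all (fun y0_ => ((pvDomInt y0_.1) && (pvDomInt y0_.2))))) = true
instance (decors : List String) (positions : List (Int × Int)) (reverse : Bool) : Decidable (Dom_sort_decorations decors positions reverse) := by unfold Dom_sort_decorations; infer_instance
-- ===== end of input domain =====

-- B replaces A's three full filter-scans + whole-list sort + fourth filtering scan by one
-- categorizing pass into four buckets and a sort of only the leftover bucket (objective: faster).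

-- ===== PORT A =====
-- literal transliteration of A: three index loops appending (decor, position) matches of each
-- category, then a loop over the fully sorted zip appending the uncategorized rest, then a
-- conditional double reverse (xs[::-1] = List.reverse, per PySem.List.slice?_none_none_neg_one).
def sort_decorations (decors : List String) (positions : List (Int × Int)) (reverse : Bool) : List String × (List (Int × Int)) :=
  -- mats get drawn first
  let s1 : List String × List (Int × Int) :=
    (PySem.List.pyRange 0 (PySem.List.len decors) 1).foldl
      (fun acc i =>
        if PySem.Str.endswith (PySem.List.pyGetD decors i "") "MAT" then
          (acc.1 ++ [PySem.List.pyGetD decors i ""], acc.2 ++ [PySem.List.pyGetD positions i ((0 : Int), (0 : Int))])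
        else acc) ([], [])
  -- then desks
  let s2 : List String × List (Int × Int) :=
    (PySem.List.pyRange 0 (PySem.List.len decors) 1).foldl
      (fun acc i =>
        if PySem.Str.endswith (PySem.List.pyGetD decors i "") "DESK" || PySem.List.pyGetD decors i "" == "DECOR_TIRE" then
          (acc.1 ++ [PySem.List.pyGetD decors i ""], acc.2 ++ [PySem.List.pyGetD positions i ((0 : Int), (0 : Int))])
        else acc) s1
  -- then bricks
  let s3 : List String × List (Int × Int) :=
    (PySem.List.pyRange 0 (PySem.List.len decors) 1).foldl
      (fun acc i =>
        if PySem.Str.endswith (PySem.List.pyGetD decors i "") "BRICK" then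
          (acc.1 ++ [PySem.List.pyGetD decors i ""], acc.2 ++ [PySem.List.pyGetD positions i ((0 : Int), (0 : Int))])
        else acc) s2
  -- then everything else, but lower y values get drawn first
  let sorted_decs := PySem.List.sorted (decors.zip positions) (fun x => x.2.2) reverse
  let s4 : List String × List (Int × Int) :=
    sorted_decs.foldl
      (fun acc z =>
        if !PySem.Str.endswith z.1 "MAT" && !PySem.Str.endswith z.1 "DESK" &&
           !PySem.Str.endswith z.1 "BRICK" && !(z.1 == "DECOR_TIRE") then
          (acc.1 ++ [z.1], acc.2 ++ [z.2])
        else acc) s3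
  if reverse then (s4.1.reverse, s4.2.reverse) else (s4.1, s4.2)

-- ===== PORT B =====
-- literal transliteration of B: one classifying pass into four buckets, sort only the leftover
-- bucket by y, concatenate, reverse once if requested, then project the two columns.
def sort_decorations_alt (decors : List String) (positions : List (Int × Int)) (reverse : Bool) : List String × (List (Int × Int)) :=
  let bs : List (String × (Int × Int)) × List (String × (Int × Int)) × List (String × (Int × Int)) × List (String × (Int × Int)) :=
    (decors.zip positions).foldl
      (fun acc z =>
        if PySem.Str.endswith z.1 "MAT" then
          (acc.1 ++ [z], acc.2.1, acc.2.2.1, acc.2.2.2)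
        else if PySem.Str.endswith z.1 "DESK" || z.1 == "DECOR_TIRE" then
          (acc.1, acc.2.1 ++ [z], acc.2.2.1, acc.2.2.2)
        else if PySem.Str.endswith z.1 "BRICK" then
          (acc.1, acc.2.1, acc.2.2.1 ++ [z], acc.2.2.2)
        else
          (acc.1, acc.2.1, acc.2.2.1, acc.2.2.2 ++ [z]))
      ([], [], [], [])
  let rest := PySem.List.sorted bs.2.2.2 (fun x => x.2.2) reverse
  let ordered := bs.1 ++ bs.2.1 ++ bs.2.2.1 ++ rest
  let ordered2 := if reverse then ordered.reverse else ordered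
  (ordered2.map Prod.fst, ordered2.map Prod.snd)

-- ===== PRECONDITION & SPEC =====
-- Pre_ excludes exactly the inputs on which A raises IndexError: a decor without a matching
-- position (index ≥ len(positions)) that falls in one of the named categories, so that one of
-- A's three index loops reads positions[i] out of range.
def Pre_sort_decorations (decors : List String) (positions : List (Int × Int)) (reverse : Bool) : Prop :=
  ∀ s ∈ decors.drop positions.length,
    (PySem.Str.endswith s "MAT" || PySem.Str.endswith s "DESK" || s == "DECOR_TIRE" ||
      PySem.Str.endswith s "BRICK") = false
instance (decors : List String) (positions : List (Int × Int)) (reverse : Bool) : Decidable (Pre_sort_decorations decors positions reverse) := by unfold Pre_sort_decorations; infer_instance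

def pvWitness_sort_decorations : List String × (List (Int × Int)) × Bool :=
  (["DECOR_XMAT", "DECOR_TIRE", "DECOR_Y", "DECOR_BRICK"], [(0, 1), (2, 3), (4, 5), (1, 3)], true)

def Spec_sort_decorations (decors : List String) (positions : List (Int × Int)) (reverse : Bool) (out : List String × (List (Int × Int))) : Prop := out = sort_decorations_alt decors positions reverse
instance (decors : List String) (positions : List (Int × Int)) (reverse : Bool) (out : List String × (List (Int × Int))) : Decidable (Spec_sort_decorations decors positions reverse out) := by unfold Spec_sort_decorations; infer_instance

-- ===== CLAIM (what is proved, stated in full; the proofs are below) =====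
def Claim_equal_sort_decorations : Prop := ∀ (decors : List String) (positions : List (Int × Int)) (reverse : Bool), Dom_sort_decorations decors positions reverse → Pre_sort_decorations decors positions reverse → Spec_sort_decorations decors positions reverse (sort_decorations decors positions reverse)


-- ===== LEMMAS AND PROOFS =====

-- a fold whose body ignores its element is the identity
theorem pv_foldl_id {α β : Type} (init : β) (l : List α) :
    List.foldl (fun acc _ => acc) init l = init := by
  induction l generalizing init with
  | nil => rfl
  | cons x t ih => exact ih init

theorem pv_or4_false (a b c d : Bool) (h : (a || b || c || d) = false) :
    a = false ∧ b = false ∧ c = false ∧ d = false := by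
  cases a <;> cases b <;> cases c <;> cases d <;> simp_all

-- An index loop 'for i in range(len(decors))' whose body reads decors[i] and positions[i] and
-- does nothing on decors that have no position (hskip) is a fold over the zipped list.
theorem pv_fold_idx {β : Type} (decors : List String) (positions : List (Int × Int))
    (f : β → String × (Int × Int) → β)
    (hskip : ∀ (acc : β), ∀ s ∈ decors.drop positions.length, f acc (s, ((0 : Int), (0 : Int))) = acc) :
    ∀ (init : β),
    List.foldl (fun acc i => f acc (PySem.List.pyGetD decors i "", PySem.List.pyGetD positions i ((0 : Int), (0 : Int)))) init
      (PySem.List.pyRange 0 (PySem.List.len decors) 1)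
      = List.foldl f init (decors.zip positions) := by
  intro init
  have hzlen : (decors.zip positions).length = min decors.length positions.length := List.length_zip
  have hlen : PySem.List.len decors = (decors.length : Int) := by simp [PySem.List.len]
  have hsplit := PySem.List.pyRange_one_append 0 ((decors.zip positions).length : Int)
      (PySem.List.len decors) (by positivity)
      (by rw [hlen]; exact_mod_cast (by omega : (decors.zip positions).length ≤ decors.length))
  rw [hsplit, List.foldl_append]
  have h1 : List.foldl (fun acc i => f acc (PySem.List.pyGetD decors i "", PySem.List.pyGetD positions i ((0 : Int), (0 : Int)))) init
      (PySem.List.pyRange 0 ((decors.zip positions).length : Int))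
      = List.foldl f init (decors.zip positions) := by
    have hlz : ((decors.zip positions).length : Int) = PySem.List.len (decors.zip positions) := by
      simp [PySem.List.len]
    rw [hlz]
    refine Eq.trans
      (PySem.List.foldl_congr_mem _ _
        (fun acc j => f acc (PySem.List.pyGetD (decors.zip positions) j ("", ((0 : Int), (0 : Int))))) init ?_)
      (PySem.List.foldl_pyRange_zero_pyGetD (decors.zip positions) ("", ((0 : Int), (0 : Int))) f init)
    intro acc i hi
    obtain ⟨h0, h1⟩ := PySem.List.mem_pyRange_one.mp hi
    have h1' : i < ((decors.zip positions).length : Int) := by simpa [PySem.List.len] using h1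
    have hd : i < (decors.length : Int) := by omega
    have hp : i < (positions.length : Int) := by omega
    show f acc (PySem.List.pyGetD decors i "", PySem.List.pyGetD positions i ((0 : Int), (0 : Int)))
        = f acc (PySem.List.pyGetD (decors.zip positions) i ("", ((0 : Int), (0 : Int))))
    rw [PySem.List.pyGetD_eq_getElem _ _ h0 hd, PySem.List.pyGetD_eq_getElem _ _ h0 hp,
        PySem.List.pyGetD_eq_getElem _ _ h0 h1', List.getElem_zip]
  rw [h1]
  refine Eq.trans (PySem.List.foldl_congr_mem _ _ (fun acc _ => acc) _ ?_) (pv_foldl_id _ _)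
  intro acc i hi
  obtain ⟨h0, h1'⟩ := PySem.List.mem_pyRange_one.mp hi
  have h1'' : i < (decors.length : Int) := by rwa [hlen] at h1'
  have hmin : (positions.length : Int) ≤ i := by omega
  have hidx : i.toNat < decors.length := by omega
  have hgd : PySem.List.pyGetD decors i "" = decors[i.toNat] :=
    PySem.List.pyGetD_eq_getElem _ _ (by omega) h1''
  have hgp : PySem.List.pyGetD positions i ((0 : Int), (0 : Int)) = ((0 : Int), (0 : Int)) := by
    apply PySem.List.pyGetD_of_none
    rw [PySem.List.pyGet?_eq_none_iff]
    unfold PySem.Raise.InRange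
    omega
  have hmem : decors[i.toNat] ∈ decors.drop positions.length := by
    have hj : i.toNat - positions.length < (decors.drop positions.length).length := by
      rw [List.length_drop]; omega
    refine List.mem_iff_getElem.mpr ⟨i.toNat - positions.length, hj, ?_⟩
    rw [List.getElem_drop]
    simp only [show positions.length + (i.toNat - positions.length) = i.toNat from by omega]
  show f acc (PySem.List.pyGetD decors i "", PySem.List.pyGetD positions i ((0 : Int), (0 : Int))) = acc
  rw [hgd, hgp]
  exact hskip acc _ hmem

-- The generic shape of A's lockstep double-append loop: it appends the two projections of
-- every element passing the filter.
theorem pv_pairfold {α β γ : Type} (p : α → Bool) (g : α → β) (h : α → γ) (l : List α)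
    (a : List β) (b : List γ) :
    List.foldl (fun acc z => if p z then (acc.1 ++ [g z], acc.2 ++ [h z]) else acc) (a, b) l
      = (a ++ (l.filter p).map g, b ++ (l.filter p).map h) := by
  induction l generalizing a b with
  | nil => simp
  | cons x t ih =>
    by_cases hx : p x
    · simp [hx, ih, List.append_assoc]
    · simp [hx, ih]

-- The generic shape of B's classifying loop: four buckets, each the filter of its elif guard.
theorem pv_quadfold {α : Type} (p1 p2 p3 : α → Bool) (l : List α) (a b c d : List α) :
    List.foldl (fun acc z =>
        if p1 z then (acc.1 ++ [z], acc.2.1, acc.2.2.1, acc.2.2.2)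
        else if p2 z then (acc.1, acc.2.1 ++ [z], acc.2.2.1, acc.2.2.2)
        else if p3 z then (acc.1, acc.2.1, acc.2.2.1 ++ [z], acc.2.2.2)
        else (acc.1, acc.2.1, acc.2.2.1, acc.2.2.2 ++ [z])) (a, b, c, d) l
      = (a ++ l.filter p1,
         b ++ l.filter (fun z => !p1 z && p2 z),
         c ++ l.filter (fun z => !p1 z && !p2 z && p3 z),
         d ++ l.filter (fun z => !p1 z && !p2 z && !p3 z)) := by
  induction l generalizing a b c d with
  | nil => simp
  | cons x t ih =>
    by_cases h1 : p1 x
    · simp [h1, ih, List.append_assoc]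
    · by_cases h2 : p2 x
      · simp [h1, h2, ih, List.append_assoc]
      · by_cases h3 : p3 x
        · simp [h1, h2, h3, ih, List.append_assoc]
        · simp [h1, h2, h3, ih, List.append_assoc]

-- The category suffixes are mutually exclusive.
theorem pv_not_both_suffix (s : String) (u v : String)
    (hu : PySem.Str.endswith s u = true) (hnv : ¬ (u.toList <:+ v.toList))
    (hnu : ¬ (v.toList <:+ u.toList)) : PySem.Str.endswith s v = false := by
  cases hv : PySem.Str.endswith s v
  · rfl
  · exfalso
    rw [PySem.Str.endswith_eq] at hu hv
    rcases List.suffix_or_suffix_of_suffix ((PySem.Chars.endswith_iff _ _).mp hu)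
      ((PySem.Chars.endswith_iff _ _).mp hv) with hh | hh
    · exact hnv hh
    · exact hnu hh

theorem pv_tire_not_mat (s : String) (h : (s == "DECOR_TIRE") = true) :
    PySem.Str.endswith s "MAT" = false := by
  have hs : s = "DECOR_TIRE" := by simpa using h
  subst hs; decide

theorem pv_brick_not_tire (s : String) (h : PySem.Str.endswith s "BRICK" = true) :
    (s == "DECOR_TIRE") = false := by
  cases ht : (s == "DECOR_TIRE")
  · rfl
  · have hs : s = "DECOR_TIRE" := by simpa using ht
    subst hs; exact absurd h (by decide)

-- appending one element to the input of Python's stable sort inserts it into the sorted output.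
theorem pv_sorted_snoc {α : Type} (key : α → Int) (t : List α) (x : α) :
    PySem.List.sorted (t ++ [x]) key false =
      PySem.List.insertBy (fun a b => decide (key a < key b)) x (PySem.List.sorted t key false) := by
  rw [PySem.List.sorted_eq_foldl_insertBy (t ++ [x]) key, List.foldl_append,
      ← PySem.List.sorted_eq_foldl_insertBy t key]
  simp

theorem pv_sorted_snoc_rev {α : Type} (key : α → Int) (t : List α) (x : α) :
    PySem.List.sorted (t ++ [x]) key true =
      PySem.List.insertBy (fun a b => decide (key b < key a)) x (PySem.List.sorted t key true) := by
  rw [PySem.List.sorted_rev_eq_foldl_insertBy (t ++ [x]) key, List.foldl_append,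
      ← PySem.List.sorted_rev_eq_foldl_insertBy t key]
  simp

-- filter commutes with a single stable insertion into an r-sorted list.
theorem pv_filter_insertBy {α : Type} (p : α → Bool) (before : α → α → Bool)
    (r : α → α → Prop) (x : α) (l : List α)
    (htr : ∀ y z, before x y = true → r y z → before x z = true)
    (hl : l.Pairwise r) :
    (PySem.List.insertBy before x l).filter p =
      if p x then PySem.List.insertBy before x (l.filter p) else l.filter p := by
  induction l with
  | nil => cases hp : p x <;> simp [PySem.List.insertBy, hp]
  | cons y t ih =>
    rcases List.pairwise_cons.mp hl with ⟨hy, ht⟩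
    by_cases hb : before x y = true
    · have hall : ∀ z ∈ t, before x z = true := fun z hz => htr y z hb (hy z hz)
      cases hp : p x
      · simp [PySem.List.insertBy, hb, hp]
      · cases hpy : p y
        · cases hft : t.filter p with
          | nil => simp [PySem.List.insertBy, hb, hp, hpy, hft]
          | cons w u =>
            have hwmem : w ∈ t.filter p := by rw [hft]; exact List.mem_cons_self
            have hw : before x w = true := hall w (List.mem_of_mem_filter hwmem)
            simp [PySem.List.insertBy, hb, hp, hpy, hft, hw]
        · simp [PySem.List.insertBy, hb, hp, hpy]
    · have hb' : before x y = false := by simpa using hb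
      cases hp : p x <;> cases hpy : p y <;>
        simp [PySem.List.insertBy, hb', hp, hpy, ih ht]

-- filter commutes with Python's stable sort.
theorem pv_filter_sorted {α : Type} (p : α → Bool) (key : α → Int) (rev : Bool) (xs : List α) :
    (PySem.List.sorted xs key rev).filter p = PySem.List.sorted (xs.filter p) key rev := by
  cases rev
  · induction xs using List.reverseRecOn with
    | nil => simp [PySem.List.sorted]
    | append_singleton t x ih =>
      rw [pv_sorted_snoc, pv_filter_insertBy p _ (fun a b => key a ≤ key b) x _
            (fun y z hxy hyz => by simp only [decide_eq_true_eq] at hxy ⊢; omega)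
            (PySem.List.sorted_pairwise t key),
          ih, List.filter_append]
      cases hp : p x
      · simp [hp]
      · simp only [List.filter_cons, hp, if_true, List.filter_nil]
        rw [pv_sorted_snoc]
  · induction xs using List.reverseRecOn with
    | nil => simp [PySem.List.sorted]
    | append_singleton t x ih =>
      rw [pv_sorted_snoc_rev, pv_filter_insertBy p _ (fun a b => key b ≤ key a) x _
            (fun y z hxy hyz => by simp only [decide_eq_true_eq] at hxy ⊢; omega)
            (PySem.List.sorted_pairwise_rev t key),
          ih, List.filter_append]
      cases hp : p x
      · simp [hp]
      · simp only [List.filter_cons, hp, if_true, List.filter_nil]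
        rw [pv_sorted_snoc_rev]

-- A's written order of the leftover guard equals B's elif-negation order
theorem pv_bool_reshuffle (m d k t : Bool) :
    (!m && !d && !k && !t) = (!m && !(d || t) && !k) := by
  cases m <;> cases d <;> cases k <;> cases t <;> rfl

-- derived exclusivity facts between the three category guards
theorem pv_desk_not_mat (s : String)
    (h : (PySem.Str.endswith s "DESK" || s == "DECOR_TIRE") = true) :
    PySem.Str.endswith s "MAT" = false := by
  cases hd : PySem.Str.endswith s "DESK"
  · have ht : (s == "DECOR_TIRE") = true := by
      simp only [hd, Bool.false_or] at h; exact h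
    exact pv_tire_not_mat s ht
  · exact pv_not_both_suffix s "DESK" "MAT" hd (by decide) (by decide)

theorem pv_brick_not_mat (s : String) (h : PySem.Str.endswith s "BRICK" = true) :
    PySem.Str.endswith s "MAT" = false :=
  pv_not_both_suffix s "BRICK" "MAT" h (by decide) (by decide)

theorem pv_brick_not_desk_tire (s : String) (h : PySem.Str.endswith s "BRICK" = true) :
    (PySem.Str.endswith s "DESK" || s == "DECOR_TIRE") = false := by
  rw [pv_not_both_suffix s "BRICK" "DESK" h (by decide) (by decide), pv_brick_not_tire s h]
  rfl

-- ===== VERDICT (by name: the statement is the Claim_ definition above) =====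
theorem sort_decorations_spec : Claim_equal_sort_decorations := by
  intro decors positions reverse _hdom hpre
  unfold Spec_sort_decorations
  have hP : ∀ s ∈ decors.drop positions.length,
      PySem.Str.endswith s "MAT" = false ∧ PySem.Str.endswith s "DESK" = false ∧
      (s == "DECOR_TIRE") = false ∧ PySem.Str.endswith s "BRICK" = false :=
    fun s hs => pv_or4_false _ _ _ _ (hpre s hs)
  simp only [sort_decorations, sort_decorations_alt]
  -- turn each of A's index loops into a fold over the zipped list (the skipped tail does nothing)
  rw [pv_fold_idx decors positions
        (fun acc z => if PySem.Str.endswith z.1 "MAT" then (acc.1 ++ [z.1], acc.2 ++ [z.2]) else acc)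
        (fun acc s hs => by
          show (if PySem.Str.endswith s "MAT" = true then (acc.1 ++ [s], acc.2 ++ [((0 : Int), (0 : Int))]) else acc) = acc
          rw [(hP s hs).1]; rfl)]
  rw [pv_fold_idx decors positions
        (fun acc z => if PySem.Str.endswith z.1 "DESK" || z.1 == "DECOR_TIRE" then (acc.1 ++ [z.1], acc.2 ++ [z.2]) else acc)
        (fun acc s hs => by
          show (if (PySem.Str.endswith s "DESK" || s == "DECOR_TIRE") = true then (acc.1 ++ [s], acc.2 ++ [((0 : Int), (0 : Int))]) else acc) = acc
          rw [(hP s hs).2.1, (hP s hs).2.2.1]; rfl)]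
  rw [pv_fold_idx decors positions
        (fun acc z => if PySem.Str.endswith z.1 "BRICK" then (acc.1 ++ [z.1], acc.2 ++ [z.2]) else acc)
        (fun acc s hs => by
          show (if PySem.Str.endswith s "BRICK" = true then (acc.1 ++ [s], acc.2 ++ [((0 : Int), (0 : Int))]) else acc) = acc
          rw [(hP s hs).2.2.2]; rfl)]
  -- characterize the loops as filters
  rw [pv_pairfold (fun z : String × (Int × Int) => PySem.Str.endswith z.1 "MAT") (fun z => z.1) (fun z => z.2)]
  rw [pv_pairfold (fun z : String × (Int × Int) => PySem.Str.endswith z.1 "DESK" || z.1 == "DECOR_TIRE") (fun z => z.1) (fun z => z.2)]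
  rw [pv_pairfold (fun z : String × (Int × Int) => PySem.Str.endswith z.1 "BRICK") (fun z => z.1) (fun z => z.2)]
  rw [pv_pairfold (fun z : String × (Int × Int) =>
        !PySem.Str.endswith z.1 "MAT" && !PySem.Str.endswith z.1 "DESK" &&
        !PySem.Str.endswith z.1 "BRICK" && !(z.1 == "DECOR_TIRE")) (fun z => z.1) (fun z => z.2)]
  rw [pv_quadfold (fun z : String × (Int × Int) => PySem.Str.endswith z.1 "MAT")
        (fun z => PySem.Str.endswith z.1 "DESK" || z.1 == "DECOR_TIRE")
        (fun z => PySem.Str.endswith z.1 "BRICK")]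
  -- identify the four buckets on the two sides
  have hpd : (decors.zip positions).filter
        (fun z => !PySem.Str.endswith z.1 "MAT" && (PySem.Str.endswith z.1 "DESK" || z.1 == "DECOR_TIRE"))
      = (decors.zip positions).filter (fun z => PySem.Str.endswith z.1 "DESK" || z.1 == "DECOR_TIRE") := by
    refine List.filter_congr fun z _ => ?_
    cases h2 : (PySem.Str.endswith z.1 "DESK" || z.1 == "DECOR_TIRE")
    · simp only [Bool.and_false]
    · simp only [pv_desk_not_mat z.1 h2, Bool.not_false, Bool.true_and]
  have hpb : (decors.zip positions).filter
        (fun z => !PySem.Str.endswith z.1 "MAT" &&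
          !(PySem.Str.endswith z.1 "DESK" || z.1 == "DECOR_TIRE") && PySem.Str.endswith z.1 "BRICK")
      = (decors.zip positions).filter (fun z => PySem.Str.endswith z.1 "BRICK") := by
    refine List.filter_congr fun z _ => ?_
    cases h3 : PySem.Str.endswith z.1 "BRICK"
    · simp only [Bool.and_false]
    · simp only [pv_brick_not_mat z.1 h3, pv_brick_not_desk_tire z.1 h3,
        Bool.not_false, Bool.and_true]
  have hpe : (decors.zip positions).filter
        (fun z => !PySem.Str.endswith z.1 "MAT" && !PySem.Str.endswith z.1 "DESK" &&
          !PySem.Str.endswith z.1 "BRICK" && !(z.1 == "DECOR_TIRE"))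
      = (decors.zip positions).filter
        (fun z => !PySem.Str.endswith z.1 "MAT" &&
          !(PySem.Str.endswith z.1 "DESK" || z.1 == "DECOR_TIRE") && !PySem.Str.endswith z.1 "BRICK") := by
    exact List.filter_congr fun z _ =>
      pv_bool_reshuffle (PySem.Str.endswith z.1 "MAT") (PySem.Str.endswith z.1 "DESK")
        (PySem.Str.endswith z.1 "BRICK") (z.1 == "DECOR_TIRE")
  -- A filters the sorted list; B sorts the filtered list: stable sorting commutes with filter
  rw [pv_filter_sorted, hpe, hpd, hpb]
  cases reverse <;>
    simp [List.map_append, List.map_reverse, List.append_assoc]
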